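-- pv_equiv track=rewrite | github.com/CJiu01/BaekJoon_Online_Judge | 백준/Gold/17140. 이차원 배열과 연산/이차원 배열과 연산.py | oper_R
-- ===== SOURCE A (Python) =====
-- from collections import Counter
--
-- def oper_R(arr):
--     trans_arr = []
--     for j in range(len(arr)):
--         counter = Counter(i for i in arr[j] if i!=0)
--
--         count_vec = []
--         for a,b in counter.items():
--             count_vec.append([a,b])
--
--         count_vec.sort(key= lambda x: (x[1],x[0]))
--         trans_arr.append(count_vec)
--     return trans_arr
-- ===== SOURCE B (Python) =====
-- def oper_R(arr):
--     out = []
--     for row in arr: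
--         vals = sorted(v for v in row if v != 0)
--         # run-length encode the sorted values: one [value, count] per run
--         runs = []
--         for v in vals:
--             if runs and runs[-1][0] == v:
--                 runs[-1][1] += 1
--             else:
--                 runs.append([v, 1])
--         # counting-sort the runs on their count (every count is <= len(row));
--         # runs already carry increasing values, so each bucket stays value-sorted
--         buckets = [[] for _ in range(len(row) + 1)]
--         for v, c in runs:
--             buckets[c].append([v, c])
--         out.append([p for b in buckets for p in b])
--     return out
-- ===== Notes on version B (the rewrite author's own statement) =====
-- stated objective: alternative
-- what changed: B never sorts pairs and never hashes: it sorts each row's non-zero values once, run-length-encodes the sorted list in a single last-run pass (no Counter), and then produces the final (count, value) order by counting-sort — distributing the runs into buckets indexed by their count (bounded by the row length) and concatenating the buckets, exploiting that runs already arrive in increasing value order.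
import Mathlib
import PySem

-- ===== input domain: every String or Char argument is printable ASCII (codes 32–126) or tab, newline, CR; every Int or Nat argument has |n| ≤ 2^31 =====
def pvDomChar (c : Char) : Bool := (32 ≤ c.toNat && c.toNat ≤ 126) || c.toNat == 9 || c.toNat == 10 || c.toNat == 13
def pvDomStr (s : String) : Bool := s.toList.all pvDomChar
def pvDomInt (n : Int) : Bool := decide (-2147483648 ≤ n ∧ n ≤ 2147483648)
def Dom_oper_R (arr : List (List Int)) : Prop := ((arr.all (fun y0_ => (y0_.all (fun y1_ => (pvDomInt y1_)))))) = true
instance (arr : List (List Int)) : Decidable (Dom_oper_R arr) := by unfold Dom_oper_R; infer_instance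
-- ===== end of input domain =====

-- B replaces both of A's passes: it run-length-encodes each row's sorted non-zero values
-- (no Counter) and obtains the (count, value) order by counting-sort into buckets indexed
-- by the count (no comparison sort of pairs) — objective: alternative.

-- ===== PORT A =====
def oper_R (arr : List (List Int)) : List (List (List Int)) :=
  (PySem.List.pyRange 0 (PySem.List.len arr)).foldl (fun transArr j =>
    let counter := PySem.Dict.counter ((PySem.List.pyGetD arr j []).filter (fun i => i != 0))
    let countVec := counter.items.foldl (fun cv p => cv ++ [[p.1, p.2]]) []
    transArr ++ [PySem.List.sorted2 countVec
      (fun x => PySem.List.pyGetD x 1 0) (fun x => PySem.List.pyGetD x 0 0)]) []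

-- ===== PORT B =====
-- one step of Source B's run-length loop: extend the last run or start a new one
def addRun (runs : List (Int × Int)) (v : Int) : List (Int × Int) :=
  match runs.getLast? with
  | some p => if p.1 == v then runs.dropLast ++ [(p.1, p.2 + 1)] else runs ++ [(v, 1)]
  | none => runs ++ [(v, 1)]

def oper_R_alt (arr : List (List Int)) : List (List (List Int)) :=
  arr.map (fun row =>
    let vals := PySem.List.sorted (row.filter (fun v => v != 0)) (fun x => x)
    let runs := vals.foldl addRun []
    -- buckets[c] collects the runs of count c; run counts are ≥ 1, so '.toNat' is exact
    let buckets := runs.foldl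
      (fun bs p => bs.modify p.2.toNat (fun b => b ++ [[p.1, p.2]]))
      ((List.range (row.length + 1)).map (fun _ => ([] : List (List Int))))
    buckets.flatten)

-- ===== PRECONDITION & SPEC =====
def Spec_oper_R (arr : List (List Int)) (out : List (List (List Int))) : Prop := out = oper_R_alt arr
instance (arr : List (List Int)) (out : List (List (List Int))) : Decidable (Spec_oper_R arr out) := by unfold Spec_oper_R; infer_instance

-- ===== CLAIM (what is proved, stated in full; the proofs are below) =====
def Claim_equal_oper_R : Prop := ∀ (arr : List (List Int)), Dom_oper_R arr → Spec_oper_R arr (oper_R arr)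

-- ===== LEMMAS AND PROOFS =====

-- sorted2 with two Int keys IS sorted with the lexicographic pair key
theorem sorted2_eq_sorted_lex (xs : List (List Int)) (k1 k2 : List Int → Int) :
    PySem.List.sorted2 xs k1 k2 =
      PySem.List.sorted xs (fun x => toLex (k1 x, k2 x)) := by
  rw [PySem.List.sorted_eq_foldl_insertBy]
  show xs.foldl _ [] = xs.foldl _ []
  congr 1
  funext acc x
  congr 1
  funext a b
  rcases lt_trichotomy (k1 a) (k1 b) with h | h | h
  · simp [Prod.Lex.toLex_lt_toLex, h, lt_asymm h]
  · simp [Prod.Lex.toLex_lt_toLex, h]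
  · simp [Prod.Lex.toLex_lt_toLex, h, lt_asymm h, ne_of_gt h]

-- x does not survive into the dropWhile tail of its own run (the list is weakly increasing)
theorem not_mem_dropWhile_sorted (x : Int) (xs : List Int)
    (hs : (x :: xs).Pairwise (· ≤ ·)) : x ∉ xs.dropWhile (fun y => y == x) := by
  intro hmem
  have hx_le : ∀ y ∈ xs, x ≤ y := (List.pairwise_cons.mp hs).1
  have hd_sorted : (xs.dropWhile (fun y => y == x)).Pairwise (· ≤ ·) :=
    List.Pairwise.sublist (List.dropWhile_sublist _) (List.pairwise_cons.mp hs).2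
  rcases h : xs.dropWhile (fun y => y == x) with _ | ⟨h0, tl⟩
  · rw [h] at hmem; simp at hmem
  · have hne' : h0 ≠ x := by
      have hne0 := List.head_dropWhile_not (fun y => y == x) (l := xs) (by simp [h])
      simp only [h, List.head_cons] at hne0
      simpa using hne0
    have hh0 : h0 ∈ xs := (List.dropWhile_sublist _).mem (h ▸ List.mem_cons_self)
    have hle : x ≤ h0 := hx_le h0 hh0
    have hge : h0 ≤ x := by
      rw [h] at hmem hd_sorted
      rcases List.mem_cons.mp hmem with hxx | hx_tl
      · exact le_of_eq hxx.symm
      · exact (List.pairwise_cons.mp hd_sorted).1 x hx_tl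
    exact hne' (le_antisymm hge hle)

-- the run-length encoding of a list, structurally (specification of Source B's loop)
def runsOf : List Int → List (Int × Int)
  | [] => []
  | x :: xs =>
      (x, ((xs.takeWhile (fun y => y == x)).length : Int) + 1) ::
        runsOf (xs.dropWhile (fun y => y == x))
  termination_by l => l.length
  decreasing_by
    simpa using Nat.lt_succ_of_le (List.length_dropWhile_le (fun y => y == x) xs)

theorem addRun_ne_nil (runs : List (Int × Int)) (v : Int) : addRun runs v ≠ [] := by
  rcases h : runs.getLast? with _ | p
  · unfold addRun; rw [h]; simp
  · unfold addRun; rw [h]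
    show (if (p.1 == v) = true then runs.dropLast ++ [(p.1, p.2 + 1)]
          else runs ++ [(v, 1)]) ≠ []
    split_ifs <;> simp

-- addRun only touches the last run
theorem addRun_append (rs qs : List (Int × Int)) (h : qs ≠ []) (v : Int) :
    addRun (rs ++ qs) v = rs ++ addRun qs v := by
  unfold addRun
  rcases hq : qs.getLast? with _ | p
  · exact absurd (List.getLast?_eq_none_iff.mp hq) h
  · rw [List.getLast?_append, hq]
    simp only [Option.some_or]
    split_ifs
    · rw [List.dropLast_append_of_ne_nil h, List.append_assoc]
    · rw [List.append_assoc]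

theorem foldl_addRun_append (s : List Int) (rs qs : List (Int × Int)) (h : qs ≠ []) :
    s.foldl addRun (rs ++ qs) = rs ++ s.foldl addRun qs := by
  induction s generalizing qs with
  | nil => rfl
  | cons v s ih =>
      simp only [List.foldl_cons]
      rw [addRun_append rs qs h v]
      exact ih (addRun qs v) (addRun_ne_nil qs v)

-- feeding a block of copies of x into a single open run just bumps its count
theorem foldl_addRun_const (x : Int) (t : List Int) (ht : ∀ y ∈ t, y = x) :
    ∀ (r : List Int) (c : Int),
      (t ++ r).foldl addRun [(x, c)] = r.foldl addRun [(x, c + t.length)] := by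
  induction t with
  | nil => intro r c; simp
  | cons y t ih =>
      intro r c
      have hy : y = x := ht y List.mem_cons_self
      have hstep : addRun [(x, c)] y = [(x, c + 1)] := by
        unfold addRun; simp [hy]
      simp only [List.cons_append, List.foldl_cons, hstep]
      rw [ih (fun z hz => ht z (List.mem_cons_of_mem _ hz)) r (c + 1)]
      have harith : c + 1 + ((t.length : Int)) = c + (((y :: t).length : Int)) := by
        push_cast [List.length_cons]
        ring
      rw [harith]

-- Source B's single-pass loop computes exactly the structural run-length encoding
theorem foldl_addRun_eq_runsOf (s : List Int) : s.foldl addRun [] = runsOf s := by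
  induction s using runsOf.induct with
  | case1 => simp [runsOf]
  | case2 x xs ih =>
      have hstep : addRun [] x = [(x, 1)] := by unfold addRun; simp
      simp only [List.foldl_cons, hstep]
      have hsplit : xs.takeWhile (fun y => y == x) ++ xs.dropWhile (fun y => y == x) = xs :=
        List.takeWhile_append_dropWhile
      have htk : ∀ y ∈ xs.takeWhile (fun y => y == x), y = x := by
        intro y hy; simpa using List.mem_takeWhile_imp hy
      conv_lhs => rw [← hsplit]
      rw [foldl_addRun_const x _ htk]
      rcases hr : xs.dropWhile (fun y => y == x) with _ | ⟨y, r'⟩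
      · simp [runsOf, hr, add_comm]
      · have hyx : y ≠ x := by
          have hne0 := List.head_dropWhile_not (fun y => y == x) (l := xs) (by simp [hr])
          simp only [hr, List.head_cons] at hne0
          simpa using hne0
        have hstep2 : addRun [(x, 1 + ((xs.takeWhile (fun y => y == x)).length : Int))] y
            = [(x, 1 + ((xs.takeWhile (fun y => y == x)).length : Int)), (y, 1)] := by
          unfold addRun; simp [Ne.symm hyx]
        have hstep3 : addRun [] y = [(y, 1)] := by unfold addRun; simp
        have ih' : r'.foldl addRun [(y, 1)] = runsOf (y :: r') := by
          have h0 : (y :: r').foldl addRun [] = runsOf (y :: r') := hr ▸ ih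
          rwa [List.foldl_cons, hstep3] at h0
        rw [List.foldl_cons, hstep2,
            show [(x, 1 + ((xs.takeWhile (fun y => y == x)).length : Int)), (y, 1)]
              = [(x, 1 + ((xs.takeWhile (fun y => y == x)).length : Int))] ++ [(y, 1)] from rfl,
            foldl_addRun_append _ _ _ (by simp), ih']
        conv_rhs => rw [runsOf, hr]
        simp [add_comm]

-- every element of runsOf s (s weakly increasing) is (k, count k s) for some k ∈ s, and conversely
theorem mem_runsOf (s : List Int) (hs : s.Pairwise (· ≤ ·)) (a : Int × Int) :
    a ∈ runsOf s ↔ ∃ k, k ∈ s ∧ a = (k, (s.count k : Int)) := by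
  induction s using runsOf.induct with
  | case1 => simp [runsOf]
  | case2 x xs ih =>
    have hsplit : xs.takeWhile (fun y => y == x) ++ xs.dropWhile (fun y => y == x) = xs :=
      List.takeWhile_append_dropWhile
    have htk : ∀ y ∈ xs.takeWhile (fun y => y == x), y = x := by
      intro y hy; simpa using List.mem_takeWhile_imp hy
    have hd_sorted : (xs.dropWhile (fun y => y == x)).Pairwise (· ≤ ·) :=
      List.Pairwise.sublist (List.dropWhile_sublist _) (List.pairwise_cons.mp hs).2
    have hxd : x ∉ xs.dropWhile (fun y => y == x) := not_mem_dropWhile_sorted x xs hs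
    have hcnt : xs.count x = (xs.takeWhile (fun y => y == x)).length := by
      conv_lhs => rw [← hsplit]
      rw [List.count_append]
      have h1 : (xs.takeWhile (fun y => y == x)).count x
          = (xs.takeWhile (fun y => y == x)).length := by
        apply List.count_eq_length.mpr
        intro y hy; simpa using (htk y hy).symm
      have h2 : (xs.dropWhile (fun y => y == x)).count x = 0 :=
        List.count_eq_zero.mpr hxd
      omega
    have hcx : ((x :: xs).count x : Int) = ((xs.takeWhile (fun y => y == x)).length : Int) + 1 := by
      rw [List.count_cons_self, hcnt]; push_cast; ring
    have hck : ∀ k, k ≠ x → (x :: xs).count k = (xs.dropWhile (fun y => y == x)).count k := by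
      intro k hk
      have hstep : (x :: xs).count k = xs.count k := by
        rw [List.count_cons]; simp [Ne.symm hk]
      rw [hstep]
      conv_lhs => rw [← hsplit]
      rw [List.count_append]
      have h1 : (xs.takeWhile (fun y => y == x)).count k = 0 := by
        apply List.count_eq_zero.mpr
        intro hmem; exact hk (htk k hmem)
      omega
    constructor
    · intro ha
      rw [runsOf] at ha
      rcases List.mem_cons.mp ha with rfl | ha'
      · exact ⟨x, by simp, by rw [hcx]⟩
      · rcases (ih hd_sorted).mp ha' with ⟨k, hk_mem, rfl⟩
        have hkx : k ≠ x := fun h => hxd (h ▸ hk_mem)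
        refine ⟨k, ?_, ?_⟩
        · exact List.mem_cons_of_mem _ ((List.dropWhile_sublist _).mem hk_mem)
        · rw [hck k hkx]
    · rintro ⟨k, hk_mem, rfl⟩
      rw [runsOf]
      by_cases hkx : k = x
      · subst hkx; exact List.mem_cons.mpr (Or.inl (by rw [hcx]))
      · have hk_xs : k ∈ xs := by
          rcases List.mem_cons.mp hk_mem with h | h
          · exact absurd h hkx
          · exact h
        have hk_d : k ∈ xs.dropWhile (fun y => y == x) := by
          rw [← hsplit] at hk_xs
          rcases List.mem_append.mp hk_xs with h | h
          · exact absurd (htk k h) hkx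
          · exact h
        apply List.mem_cons_of_mem
        exact (ih hd_sorted).mpr ⟨k, hk_d, by rw [hck k hkx]⟩

-- the run values of a weakly increasing list are strictly increasing
theorem runsOf_heads_lt (s : List Int) (hs : s.Pairwise (· ≤ ·)) :
    (runsOf s).Pairwise (fun p q => p.1 < q.1) := by
  induction s using runsOf.induct with
  | case1 => simp [runsOf]
  | case2 x xs ih =>
    have hd_sorted : (xs.dropWhile (fun y => y == x)).Pairwise (· ≤ ·) :=
      List.Pairwise.sublist (List.dropWhile_sublist _) (List.pairwise_cons.mp hs).2
    have hxd : x ∉ xs.dropWhile (fun y => y == x) := not_mem_dropWhile_sorted x xs hs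
    rw [runsOf]
    refine List.pairwise_cons.mpr ⟨?_, ih hd_sorted⟩
    intro q hq
    rcases (mem_runsOf _ hd_sorted q).mp hq with ⟨k, hk_mem, rfl⟩
    have hk_xs : k ∈ xs := (List.dropWhile_sublist _).mem hk_mem
    have hle : x ≤ k := (List.pairwise_cons.mp hs).1 k hk_xs
    have hne : x ≠ k := fun h => hxd (h ▸ hk_mem)
    exact lt_of_le_of_ne hle hne

-- counts in runsOf are at least 1
theorem runsOf_count_pos (s : List Int) (p : Int × Int) (hp : p ∈ runsOf s) : 1 ≤ p.2 := by
  induction s using runsOf.induct with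
  | case1 => simp [runsOf] at hp
  | case2 x xs ih =>
    rw [runsOf] at hp
    rcases List.mem_cons.mp hp with rfl | hp'
    · simp
    · exact ih hp'

-- counts in runsOf are at most the list length
theorem runsOf_count_le (s : List Int) (hs : s.Pairwise (· ≤ ·)) (p : Int × Int)
    (hp : p ∈ runsOf s) : p.2 ≤ (s.length : Int) := by
  rcases (mem_runsOf s hs p).mp hp with ⟨k, _, rfl⟩
  show ((s.count k : Int)) ≤ (s.length : Int)
  exact_mod_cast List.count_le_length

-- the bucket-distribution loop, in closed form
theorem buckets_foldl (rs : List (Int × Int)) (m : Nat) (g : Nat → List (List Int))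
    (h : ∀ p ∈ rs, p.2.toNat < m) :
    rs.foldl (fun bs p => bs.modify p.2.toNat (fun b => b ++ [[p.1, p.2]]))
        ((List.range m).map g)
      = (List.range m).map (fun c =>
          g c ++ (rs.filter (fun p => p.2.toNat == c)).map (fun p => [p.1, p.2])) := by
  induction rs generalizing g with
  | nil => simp
  | cons p rs ih =>
      simp only [List.foldl_cons]
      have hmod : ((List.range m).map g).modify p.2.toNat (fun b => b ++ [[p.1, p.2]])
          = (List.range m).map (fun c => if p.2.toNat = c then g c ++ [[p.1, p.2]] else g c) := by
        apply List.ext_getElem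
        · simp
        · intro i h1 h2
          simp only [List.length_modify, List.length_map, List.length_range] at h1
          rw [List.getElem_modify]
          simp [List.getElem_map, List.getElem_range]
      rw [hmod, ih _ (fun q hq => h q (List.mem_cons_of_mem _ hq))]
      apply List.map_congr_left
      intro c _
      by_cases hc : p.2.toNat = c
      · simp [hc]
      · simp [hc]

-- ===== assembling one row =====
theorem row_eq (row : List Int) :
    PySem.List.sorted2
      ((PySem.Dict.counter (row.filter (fun i => i != 0))).items.foldl
        (fun cv p => cv ++ [[p.1, p.2]]) [])
      (fun x => PySem.List.pyGetD x 1 0) (fun x => PySem.List.pyGetD x 0 0)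
    = (((PySem.List.sorted (row.filter (fun v => v != 0)) (fun x => x)).foldl addRun []).foldl
          (fun bs p => bs.modify p.2.toNat (fun b => b ++ [[p.1, p.2]]))
          ((List.range (row.length + 1)).map (fun _ => ([] : List (List Int))))).flatten := by
  set l := row.filter (fun i => i != 0) with hl
  set s := PySem.List.sorted l (fun x => x) with hs_def
  have hs : s.Pairwise (· ≤ ·) := PySem.List.sorted_pairwise l (fun x => x)
  have hperm_sl : s.Perm l := PySem.List.sorted_perm l (fun x => x) false
  set m := row.length + 1 with hm
  set pairFn : Int × Int → List Int := fun p => [p.1, p.2] with hpairFn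
  set runs := runsOf s with hruns
  have hcount_lt : ∀ p ∈ runs, p.2.toNat < m := by
    intro p hp
    have h1 := runsOf_count_pos s p hp
    have h2 := runsOf_count_le s hs p hp
    have h3 : s.length ≤ row.length := by
      rw [hperm_sl.length_eq, hl]
      exact List.length_filter_le _ _
    omega
  -- A's count_vec in closed form
  have hCVA : (PySem.Dict.counter l).items.foldl (fun cv p => cv ++ [[p.1, p.2]]) []
      = (PySem.Set.ofList l).map (fun k => [k, (l.count k : Int)]) := by
    rw [PySem.List.foldl_append_singleton_eq_map (fun p : Int × Int => [p.1, p.2]),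
        PySem.Dict.items_counter, List.map_map]
    simp
  set key : List Int → Lex (Int × Int) :=
    fun x => toLex (PySem.List.pyGetD x 1 0, PySem.List.pyGetD x 0 0) with hkey
  have hkey_pair : ∀ p : Int × Int, key (pairFn p) = toLex (p.2, p.1) := by
    intro p
    simp [hkey, hpairFn, PySem.List.pyGetD, PySem.List.pyGet?, PySem.List.pyIdx?]
  rw [sorted2_eq_sorted_lex, hCVA, foldl_addRun_eq_runsOf,
      buckets_foldl runs m _ hcount_lt]
  set CVA := (PySem.Set.ofList l).map (fun k => [k, (l.count k : Int)]) with hCVA_def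
  set B_row := ((List.range m).map (fun c =>
      ([] : List (List Int)) ++ (runs.filter (fun p => p.2.toNat == c)).map pairFn)).flatten
    with hB_row
  -- membership characterisations
  have hmemA : ∀ a, a ∈ CVA ↔ ∃ k, k ∈ l ∧ a = [k, (l.count k : Int)] := by
    intro a
    simp only [hCVA_def, List.mem_map, PySem.Set.mem_ofList]
    constructor
    · rintro ⟨k, hk, rfl⟩; exact ⟨k, hk, rfl⟩
    · rintro ⟨k, hk, rfl⟩; exact ⟨k, hk, rfl⟩
  have hmem_runs : ∀ p, p ∈ runs ↔ ∃ k, k ∈ l ∧ p = (k, (l.count k : Int)) := by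
    intro p
    rw [hruns, mem_runsOf s hs p]
    constructor
    · rintro ⟨k, hk, rfl⟩
      exact ⟨k, hperm_sl.mem_iff.mp hk, by rw [hperm_sl.count_eq]⟩
    · rintro ⟨k, hk, rfl⟩
      exact ⟨k, hperm_sl.mem_iff.mpr hk, by rw [hperm_sl.count_eq]⟩
  have hmemB : ∀ a, a ∈ B_row ↔ ∃ p, p ∈ runs ∧ a = pairFn p := by
    intro a
    rw [hB_row, List.mem_flatten]
    constructor
    · rintro ⟨bkt, hbkt, ha⟩
      rcases List.mem_map.mp hbkt with ⟨c, _, rfl⟩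
      simp only [List.nil_append] at ha
      rcases List.mem_map.mp ha with ⟨p, hp, rfl⟩
      exact ⟨p, (List.mem_filter.mp hp).1, rfl⟩
    · rintro ⟨p, hp, rfl⟩
      refine ⟨([] : List (List Int)) ++ (runs.filter (fun q => q.2.toNat == p.2.toNat)).map pairFn,
        ?_, ?_⟩
      · exact List.mem_map.mpr ⟨p.2.toNat, List.mem_range.mpr (hcount_lt p hp), rfl⟩
      · simp only [List.nil_append]
        exact List.mem_map.mpr ⟨p, List.mem_filter.mpr ⟨hp, by simp⟩, rfl⟩
  -- runs facts
  have hheads : runs.Pairwise (fun p q => p.1 < q.1) := hruns ▸ runsOf_heads_lt s hs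
  have hpos : ∀ p ∈ runs, 1 ≤ p.2 := fun p hp => runsOf_count_pos s p (hruns ▸ hp)
  have hnd_runs : runs.Nodup := by
    refine List.Pairwise.imp ?_ hheads
    intro p q h he
    rw [he] at h
    exact lt_irrefl _ h
  -- nodup of CVA
  have hndA : CVA.Nodup := by
    apply (PySem.Set.nodup_ofList l).map
    intro a b hab
    simpa using (List.cons.injEq _ _ _ _ ▸ hab).1
  -- nodup of B_row
  have hndB : B_row.Nodup := by
    rw [hB_row, List.nodup_flatten]
    constructor
    · intro bkt hbkt
      rcases List.mem_map.mp hbkt with ⟨c, _, rfl⟩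
      simp only [List.nil_append]
      apply List.Nodup.map_on
      · intro p hp q hq he
        have hp' := List.mem_filter.mp hp
        have hq' := List.mem_filter.mp hq
        have : p.1 = q.1 ∧ p.2 = q.2 := by
          constructor
          · simpa [hpairFn] using (List.cons.injEq _ _ _ _ ▸ he).1
          · have h2 := (List.cons.injEq _ _ _ _ ▸ he).2
            simpa [hpairFn] using h2
        exact Prod.ext this.1 this.2
      · exact List.filter_sublist.nodup hnd_runs
    · have hrange : (List.range m).Pairwise (· < ·) := List.pairwise_lt_range
      apply List.Pairwise.map _ ?_ hrange
      intro c c' hcc' a ha ha'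
      simp only [List.nil_append] at ha ha'
      rcases List.mem_map.mp ha with ⟨p, hp, rfl⟩
      rcases List.mem_map.mp ha' with ⟨q, hq, he⟩
      have hpc : p.2.toNat = c := by simpa using (List.mem_filter.mp hp).2
      have hqc : q.2.toNat = c' := by simpa using (List.mem_filter.mp hq).2
      have hp2q2 : q.2 = p.2 := by
        have := (List.cons.injEq _ _ _ _ ▸ he).2
        simpa [hpairFn] using this
      omega
  have hperm : B_row.Perm CVA := by
    rw [List.perm_ext_iff_of_nodup hndB hndA]
    intro a
    rw [hmemA a, hmemB a]
    constructor
    · rintro ⟨p, hp, rfl⟩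
      rcases (hmem_runs p).mp hp with ⟨k, hk, rfl⟩
      exact ⟨k, hk, rfl⟩
    · rintro ⟨k, hk, rfl⟩
      exact ⟨(k, (l.count k : Int)), (hmem_runs _).mpr ⟨k, hk, rfl⟩, rfl⟩
  -- B_row is strictly increasing in the (count, value) key
  have hlt : B_row.Pairwise (fun a b => key a < key b) := by
    rw [hB_row, List.pairwise_flatten]
    constructor
    · intro bkt hbkt
      rcases List.mem_map.mp hbkt with ⟨c, _, rfl⟩
      simp only [List.nil_append]
      rw [List.pairwise_map]
      have hf : (runs.filter (fun p => p.2.toNat == c)).Pairwise (fun p q => p.1 < q.1) :=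
        hheads.sublist List.filter_sublist
      apply hf.imp_of_mem
      intro p q hp hq hpq
      have hpc : p.2.toNat = c := by simpa using (List.mem_filter.mp hp).2
      have hqc : q.2.toNat = c := by simpa using (List.mem_filter.mp hq).2
      have hp1 := hpos p (List.mem_filter.mp hp).1
      have hq1 := hpos q (List.mem_filter.mp hq).1
      have hp2q2 : p.2 = q.2 := by omega
      rw [hkey_pair, hkey_pair, Prod.Lex.toLex_lt_toLex]
      exact Or.inr ⟨hp2q2, hpq⟩
    · apply List.Pairwise.map _ ?_ List.pairwise_lt_range
      intro c c' hcc' a ha b hb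
      simp only [List.nil_append] at ha hb
      rcases List.mem_map.mp ha with ⟨p, hp, rfl⟩
      rcases List.mem_map.mp hb with ⟨q, hq, rfl⟩
      have hpc : p.2.toNat = c := by simpa using (List.mem_filter.mp hp).2
      have hqc : q.2.toNat = c' := by simpa using (List.mem_filter.mp hq).2
      have hp1 := hpos p (List.mem_filter.mp hp).1
      have hq1 := hpos q (List.mem_filter.mp hq).1
      rw [hkey_pair, hkey_pair, Prod.Lex.toLex_lt_toLex]
      exact Or.inl (by omega)
  exact PySem.List.sorted_eq_of_perm_of_pairwise_lt CVA B_row key hperm hlt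

-- ===== VERDICT (by name: the statement is the Claim_ definition above) =====
theorem oper_R_spec : Claim_equal_oper_R := by
  intro arr _
  show oper_R arr = oper_R_alt arr
  unfold oper_R oper_R_alt
  rw [PySem.List.foldl_append_singleton_eq_map
    (fun j => PySem.List.sorted2
      ((PySem.Dict.counter ((PySem.List.pyGetD arr j []).filter (fun i => i != 0))).items.foldl
        (fun cv p => cv ++ [[p.1, p.2]]) [])
      (fun x => PySem.List.pyGetD x 1 0) (fun x => PySem.List.pyGetD x 0 0))]
  conv_rhs => rw [← PySem.List.map_pyGetD_pyRange_zero arr []]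
  rw [List.map_map, List.nil_append]
  exact List.map_congr_left (fun j _ => row_eq (PySem.List.pyGetD arr j []))
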